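-- pv_equiv track=rewrite | github.com/emundo/scapy-packet_viewer | scapy/modules/packet_viewer/custom_views/funcs.py | data_flips
-- ===== SOURCE A (Python) =====
-- def data_flips(
--     all_data, length  # type: int
-- ):
--     # type: (...) -> List[int]
--
--     """ This method takes a list of iterable data, of same length,
--     and counts the data changes for each position of the data."""
--     flips = [0] * length
--     prev_data = list(all_data[0])  # type: List[int]
--     for data in all_data[1:]:
--         for i in range(length):
--             if data[i] != prev_data[i]:
--                 flips[i] += 1
--             prev_data[i] = data[i]
--     return flips
-- ===== SOURCE B (Python) =====
-- def _condense(column):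
--     """Collapse each maximal run of equal adjacent values to a single representative."""
--     out = []
--     for v in column:
--         if not out or out[-1] != v:
--             out.append(v)
--     return out
--
--
-- def data_flips(all_data, length):
--     """Per position: materialize the column, run-length condense it; changes = runs - 1."""
--     return [len(_condense([row[i] for row in all_data])) - 1
--             for i in range(length)]
-- ===== Notes on version B (the rewrite author's own statement) =====
-- stated objective: alternative
-- what changed: B materializes each column, collapses it into its run-length condensed list with a helper, and reports (number of runs - 1), instead of A's row-major sweep that mutates a flips counter array and a prev_data mirror array.
-- outside the precondition, e.g. on data_flips([[1]], 3): A returns [0, 0, 0], B raises IndexError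
import Mathlib
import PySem

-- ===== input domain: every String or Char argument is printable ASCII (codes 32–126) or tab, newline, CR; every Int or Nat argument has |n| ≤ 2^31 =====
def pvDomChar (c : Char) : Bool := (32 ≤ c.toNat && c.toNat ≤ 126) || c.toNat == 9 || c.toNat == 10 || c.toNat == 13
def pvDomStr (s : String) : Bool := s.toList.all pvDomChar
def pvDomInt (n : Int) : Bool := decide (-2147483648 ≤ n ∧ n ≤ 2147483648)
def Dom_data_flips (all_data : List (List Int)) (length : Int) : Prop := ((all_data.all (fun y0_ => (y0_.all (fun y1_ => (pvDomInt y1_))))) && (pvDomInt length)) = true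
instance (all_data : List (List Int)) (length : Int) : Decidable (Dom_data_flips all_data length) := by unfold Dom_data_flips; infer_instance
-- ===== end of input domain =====

-- B replaces A's row-major mutation of flips/prev_data by per-column run-length condensing (changes = runs - 1); equivalence of return values on Pre_.


-- ===== PORT A =====
-- inner 'for i in range(length)' body of A (flips/prev_data updates)
def dfStep (length : Int) (st : List Int × List Int) (data : List Int) : List Int × List Int :=
  (PySem.List.pyRange 0 length 1).foldl
    (fun st i =>
      ((if PySem.List.pyGetD data i 0 ≠ PySem.List.pyGetD st.2 i 0
          then PySem.List.pySetD st.1 i (PySem.List.pyGetD st.1 i 0 + 1)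
          else st.1),
       PySem.List.pySetD st.2 i (PySem.List.pyGetD data i 0)))
    st

def data_flips (all_data : List (List Int)) (length : Int) : List Int :=
  let flips := List.replicate length.toNat 0
  let prev_data := PySem.List.pyGetD all_data 0 []
  ((PySem.List.slice all_data (some 1) none).foldl (dfStep length) (flips, prev_data)).1

-- ===== PORT B =====
-- _condense: 'out[-1]' is only read when out is nonempty (short-circuit), ported as getLast?
def condStep (out : List Int) (v : Int) : List Int :=
  if out = [] ∨ out.getLast? ≠ some v then out ++ [v] else out

def condense (column : List Int) : List Int := column.foldl condStep []

def data_flips_alt (all_data : List (List Int)) (length : Int) : List Int :=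
  (PySem.List.pyRange 0 length 1).map (fun i =>
    ((condense (all_data.map (fun row => PySem.List.pyGetD row i 0))).length : Int) - 1)

-- ===== PRECONDITION & SPEC =====
-- Pre_ excludes exactly: empty all_data (A raises IndexError on all_data[0]); any row shorter
-- than a positive length when there are ≥2 rows (A raises IndexError on data[i]/prev_data[i]);
-- and the single-row case with a row shorter than a positive length, where A never reads the
-- row and returns [0]*length but B's column materialization row[i] raises IndexError.
def Pre_data_flips (all_data : List (List Int)) (length : Int) : Prop :=
  all_data ≠ [] ∧ (length ≤ 0 ∨ ∀ row ∈ all_data, length ≤ (row.length : Int))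
instance (all_data : List (List Int)) (length : Int) : Decidable (Pre_data_flips all_data length) := by
  unfold Pre_data_flips; infer_instance

def pvWitness_data_flips : List (List Int) × Int := ([[1, 2], [2, 2], [2, 3]], 2)

def Spec_data_flips (all_data : List (List Int)) (length : Int) (out : List Int) : Prop :=
  out = data_flips_alt all_data length
instance (all_data : List (List Int)) (length : Int) (out : List Int) : Decidable (Spec_data_flips all_data length out) := by unfold Spec_data_flips; infer_instance

-- ===== CLAIM (what is proved, stated in full; the proofs are below) =====
def Claim_equal_data_flips : Prop := ∀ (all_data : List (List Int)) (length : Int), Dom_data_flips all_data length → Pre_data_flips all_data length → Spec_data_flips all_data length (data_flips all_data length)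

-- ===== LEMMAS AND PROOFS =====

-- number of changes at column k along prev :: rows (A's specification)
def colFlips (prev : List Int) (rows : List (List Int)) (k : Nat) : Int :=
  match rows with
  | [] => 0
  | r :: rs => (if r.getD k 0 ≠ prev.getD k 0 then 1 else 0) + colFlips r rs k

theorem colFlips_nil (p : List Int) (k : Nat) : colFlips p [] k = 0 := rfl

theorem colFlips_cons (p r : List Int) (rs : List (List Int)) (k : Nat) :
    colFlips p (r :: rs) k = (if r.getD k 0 ≠ p.getD k 0 then 1 else 0) + colFlips r rs k := rfl

theorem colFlips_congr (p q : List Int) (rows : List (List Int)) (k : Nat)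
    (h : p.getD k 0 = q.getD k 0) : colFlips p rows k = colFlips q rows k := by
  cases rows with
  | nil => rfl
  | cons r rs => rw [colFlips_cons, colFlips_cons, h]

-- adjacent-change count on a plain Int column
def adjCount (x : Int) (l : List Int) : Int :=
  match l with
  | [] => 0
  | y :: t => (if y ≠ x then 1 else 0) + adjCount y t

theorem adjCount_eq_colFlips (p : List Int) (k : Nat) :
    ∀ rows : List (List Int),
      adjCount (p.getD k 0) (rows.map (fun r => r.getD k 0)) = colFlips p rows k := by
  intro rows
  induction rows generalizing p with
  | nil => rfl
  | cons r rs ih =>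
    rw [List.map_cons, colFlips_cons]
    show (if r.getD k 0 ≠ p.getD k 0 then 1 else 0) + adjCount (r.getD k 0) (rs.map _) = _
    rw [ih r]

theorem getD_set_ne (l : List Int) (n k : Nat) (v : Int) (h : n ≠ k) :
    (l.set n v).getD k 0 = l.getD k 0 := by
  simp [List.getD, h]

theorem getD_set_self (l : List Int) (n : Nat) (v : Int) (h : n < l.length) :
    (l.set n v).getD n 0 = v := by
  simp [List.getD, h]

theorem pyGetD_toNat (xs : List Int) (i : Int) (d : Int) (h0 : 0 ≤ i) (h : i < xs.length) :
    PySem.List.pyGetD xs i d = xs.getD i.toNat d := by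
  rw [PySem.List.pyGetD_eq_getElem xs d h0 h, List.getD_eq_getElem]

theorem dfStep_spec (length : Int) (data : List Int) :
    ∀ (fuel : Nat) (a : Int) (flips prev : List Int), 0 ≤ a → fuel = (length - a).toNat →
      flips.length = length.toNat → length ≤ (prev.length : Int) → length ≤ (data.length : Int) →
      ((PySem.List.pyRange a length 1).foldl
        (fun st i =>
          ((if PySem.List.pyGetD data i 0 ≠ PySem.List.pyGetD st.2 i 0
              then PySem.List.pySetD st.1 i (PySem.List.pyGetD st.1 i 0 + 1)
              else st.1),
           PySem.List.pySetD st.2 i (PySem.List.pyGetD data i 0)))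
        (flips, prev)).1.length = length.toNat ∧
      ((PySem.List.pyRange a length 1).foldl
        (fun st i =>
          ((if PySem.List.pyGetD data i 0 ≠ PySem.List.pyGetD st.2 i 0
              then PySem.List.pySetD st.1 i (PySem.List.pyGetD st.1 i 0 + 1)
              else st.1),
           PySem.List.pySetD st.2 i (PySem.List.pyGetD data i 0)))
        (flips, prev)).2.length = prev.length ∧
      (∀ k : Nat, (k : Int) < length →
        ((PySem.List.pyRange a length 1).foldl
          (fun st i =>
            ((if PySem.List.pyGetD data i 0 ≠ PySem.List.pyGetD st.2 i 0
                then PySem.List.pySetD st.1 i (PySem.List.pyGetD st.1 i 0 + 1)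
                else st.1),
             PySem.List.pySetD st.2 i (PySem.List.pyGetD data i 0)))
          (flips, prev)).1.getD k 0
          = (if a ≤ (k : Int)
              then flips.getD k 0 + (if data.getD k 0 ≠ prev.getD k 0 then 1 else 0)
              else flips.getD k 0) ∧
        ((PySem.List.pyRange a length 1).foldl
          (fun st i =>
            ((if PySem.List.pyGetD data i 0 ≠ PySem.List.pyGetD st.2 i 0
                then PySem.List.pySetD st.1 i (PySem.List.pyGetD st.1 i 0 + 1)
                else st.1),
             PySem.List.pySetD st.2 i (PySem.List.pyGetD data i 0)))
          (flips, prev)).2.getD k 0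
          = (if a ≤ (k : Int) then data.getD k 0 else prev.getD k 0)) := by
  intro fuel
  induction fuel with
  | zero =>
    intro a flips prev h0 hfuel hf hp hd
    have hle : length ≤ a := by omega
    rw [PySem.List.pyRange_one_eq_nil hle]
    refine ⟨hf, rfl, ?_⟩
    intro k hk
    have hna : ¬ a ≤ (k : Int) := by omega
    simp [hna]
  | succ fuel ih =>
    intro a flips prev h0 hfuel hf hp hd
    have ha : a < length := by omega
    have hfl : (a : Int) < (flips.length : Int) := by rw [hf]; omega
    rw [PySem.List.pyRange_one_cons ha, List.foldl_cons]
    simp only [pyGetD_toNat data a 0 h0 (by omega), pyGetD_toNat prev a 0 h0 (by omega),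
      pyGetD_toNat flips a 0 h0 hfl, PySem.List.pySetD_of_nonneg _ _ h0]
    set fl1 := (if data.getD a.toNat 0 ≠ prev.getD a.toNat 0
        then flips.set a.toNat (flips.getD a.toNat 0 + 1) else flips) with hfl1
    set pr1 := prev.set a.toNat (data.getD a.toNat 0) with hpr1
    have hfl1len : fl1.length = length.toNat := by
      rw [hfl1]; split_ifs <;> simp [hf]
    have hpr1len : pr1.length = prev.length := by simp [hpr1]
    obtain ⟨L1, L2, H⟩ := ih (a + 1) fl1 pr1 (by omega) (by omega) hfl1len
      (by rw [hpr1len]; exact hp) hd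
    refine ⟨L1, by rw [L2, hpr1len], ?_⟩
    intro k hk
    obtain ⟨H1, H2⟩ := H k hk
    by_cases hak : a + 1 ≤ (k : Int)
    · have hka : a.toNat ≠ k := by omega
      have hle : a ≤ (k : Int) := by omega
      have e1 : fl1.getD k 0 = flips.getD k 0 := by
        rw [hfl1]; split_ifs
        · exact getD_set_ne _ _ _ _ hka
        · rfl
      have e2 : pr1.getD k 0 = prev.getD k 0 := getD_set_ne _ _ _ _ hka
      rw [H1, H2, if_pos hak, if_pos hak, if_pos hle, if_pos hle, e1, e2]
      exact ⟨rfl, rfl⟩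
    · rw [H1, H2, if_neg hak, if_neg hak]
      by_cases hka : (k : Int) = a
      · have hk2 : k = a.toNat := by omega
        subst hk2
        have hle : a ≤ (a.toNat : Int) := by omega
        rw [if_pos hle, if_pos hle]
        constructor
        · rw [hfl1]; split_ifs with hc
          · rw [getD_set_self _ _ _ (by omega)]
          · omega
        · exact getD_set_self _ _ _ (by omega)
      · have hlt : ¬ a ≤ (k : Int) := by omega
        have hne : a.toNat ≠ k := by omega
        rw [if_neg hlt, if_neg hlt]
        constructor
        · rw [hfl1]; split_ifs
          · exact getD_set_ne _ _ _ _ hne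
          · rfl
        · exact getD_set_ne _ _ _ _ hne

theorem dfFold_spec (length : Int) :
    ∀ (rows : List (List Int)) (flips prev : List Int),
      flips.length = length.toNat → length ≤ (prev.length : Int) →
      (∀ r ∈ rows, length ≤ (r.length : Int)) →
      (rows.foldl (dfStep length) (flips, prev)).1.length = length.toNat ∧
      (∀ k : Nat, (k : Int) < length →
        (rows.foldl (dfStep length) (flips, prev)).1.getD k 0
          = flips.getD k 0 + colFlips prev rows k) := by
  intro rows
  induction rows with
  | nil =>
    intro flips prev hf hp hr
    exact ⟨hf, fun k hk => by simp [colFlips_nil]⟩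
  | cons r rs ih =>
    intro flips prev hf hp hr
    rw [List.foldl_cons]
    have hrlen : length ≤ (r.length : Int) := hr r (List.mem_cons_self)
    have key := dfStep_spec length r ((length - 0).toNat) 0 flips prev le_rfl rfl hf hp hrlen
    have hd1 : (dfStep length (flips, prev) r).1.length = length.toNat := key.1
    have hd2 : (dfStep length (flips, prev) r).2.length = prev.length := key.2.1
    have hdk := key.2.2
    obtain ⟨I1, I2⟩ := ih (dfStep length (flips, prev) r).1 (dfStep length (flips, prev) r).2
      hd1 (by rw [hd2]; exact hp) (fun r' hr' => hr r' (List.mem_cons_of_mem _ hr'))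
    refine ⟨I1, ?_⟩
    intro k hk
    rw [I2 k hk]
    have K1 : (dfStep length (flips, prev) r).1.getD k 0
        = (if (0 : Int) ≤ (k : Int)
            then flips.getD k 0 + (if r.getD k 0 ≠ prev.getD k 0 then 1 else 0)
            else flips.getD k 0) := (hdk k hk).1
    have K2 : (dfStep length (flips, prev) r).2.getD k 0
        = (if (0 : Int) ≤ (k : Int) then r.getD k 0 else prev.getD k 0) := (hdk k hk).2
    have hk0 : (0 : Int) ≤ (k : Int) := by omega
    rw [if_pos hk0] at K1 K2
    have hcong : colFlips (dfStep length (flips, prev) r).2 rs k = colFlips r rs k :=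
      colFlips_congr _ _ _ _ K2
    rw [K1, hcong, colFlips_cons]
    split_ifs <;> ring

-- condStep on a nonempty accumulator: the fold's length grows by adjCount of the tail
theorem condense_go (l : List Int) :
    ∀ (acc : List Int) (x : Int),
      ((l.foldl condStep (acc ++ [x])).length : Int)
        = ((acc ++ [x]).length : Int) + adjCount x l := by
  induction l with
  | nil => intro acc x; simp [adjCount]
  | cons v t ih =>
    intro acc x
    rw [List.foldl_cons]
    show ((t.foldl condStep (condStep (acc ++ [x]) v)).length : Int) = _
    by_cases hvx : v = x
    · have : condStep (acc ++ [x]) v = acc ++ [x] := by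
        unfold condStep
        rw [if_neg]
        simp [List.getLast?_append, hvx]
      rw [this, ih acc x]
      simp [adjCount, hvx]
    · have : condStep (acc ++ [x]) v = (acc ++ [x]) ++ [v] := by
        unfold condStep
        rw [if_pos]
        right
        simp [List.getLast?_append]
        exact fun h => hvx h.symm
      rw [this, ih (acc ++ [x]) v]
      simp [adjCount, hvx]
      ring

theorem condense_length (x : Int) (l : List Int) :
    ((condense (x :: l)).length : Int) = 1 + adjCount x l := by
  unfold condense
  rw [List.foldl_cons]
  have h1 : condStep [] x = [] ++ [x] := by unfold condStep; rw [if_pos (Or.inl rfl)]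
  rw [h1, condense_go l [] x]
  simp

theorem foldl_dfStep_id (length : Int) (hlen : length ≤ 0) :
    ∀ (rs : List (List Int)) (st : List Int × List Int), rs.foldl (dfStep length) st = st := by
  intro rs
  induction rs with
  | nil => intro st; rfl
  | cons x xs ihx =>
    intro st
    rw [List.foldl_cons,
      show dfStep length st x = st from by
        unfold dfStep; rw [PySem.List.pyRange_one_eq_nil hlen]; rfl]
    exact ihx st

-- ===== VERDICT (by name: the statement is the Claim_ definition above) =====
theorem data_flips_spec : Claim_equal_data_flips := by
  intro all_data length hdom hpre
  unfold Spec_data_flips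
  obtain ⟨hne, hcase⟩ := hpre
  cases all_data with
  | nil => exact absurd rfl hne
  | cons first rest =>
    unfold data_flips data_flips_alt
    simp only [PySem.List.pyGetD_zero_cons, PySem.List.slice_from_one, List.tail_cons]
    rcases hcase with hlen | hall
    · rw [PySem.List.pyRange_one_eq_nil hlen, List.map_nil,
        foldl_dfStep_id length hlen]
      simp [Int.toNat_of_nonpos hlen]
    · obtain ⟨F1, F2⟩ := dfFold_spec length rest (List.replicate length.toNat 0) first
        (List.length_replicate) (hall first (List.mem_cons_self))
        (fun r hr => hall r (List.mem_cons_of_mem _ hr))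
      apply List.ext_getElem
      · rw [F1, List.length_map, PySem.List.length_pyRange_one]; omega
      · intro k h1k h2k
        have hkl : (k : Int) < length := by
          rw [F1] at h1k; omega
        rw [← List.getD_eq_getElem _ 0 h1k, F2 k hkl, List.getElem_map,
          PySem.List.getElem_pyRange_one]
        simp only [zero_add, PySem.List.pyGetD_natCast, List.map_cons]
        rw [condense_length, adjCount_eq_colFlips]
        simp
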